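-- pv_equiv track=rewrite | github.com/amoe/occupations-browser | scripts/booth_armstrong_to_taxonomy.py | get_useful_cell_info
-- ===== SOURCE A (Python) =====
-- def get_useful_cell_info(row_values):
--     count = 0
--     first_index = None
--
--
--     for index, value in enumerate(row_values):
--         if value is not None:
--             count += 1
--             if first_index is None:
--                 first_index = index
--
--     return {
--         'count': count,
--         'first_index': first_index
--     }
-- ===== SOURCE B (Python) =====
-- def get_useful_cell_info(row_values):
--     count = sum(1 for v in row_values if v is not None)
--     first_index = next((i for i, v in enumerate(row_values) if v is not None), None)
--     return {
--         'count': count,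
--         'first_index': first_index
--     }
-- ===== Notes on version B (the rewrite author's own statement) =====
-- stated objective: idiomatic
-- what changed: The single fused accumulator loop is replaced by two independent declarative passes: a generator-sum for the count and next() over enumerate for the first non-None index.
import Mathlib
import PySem

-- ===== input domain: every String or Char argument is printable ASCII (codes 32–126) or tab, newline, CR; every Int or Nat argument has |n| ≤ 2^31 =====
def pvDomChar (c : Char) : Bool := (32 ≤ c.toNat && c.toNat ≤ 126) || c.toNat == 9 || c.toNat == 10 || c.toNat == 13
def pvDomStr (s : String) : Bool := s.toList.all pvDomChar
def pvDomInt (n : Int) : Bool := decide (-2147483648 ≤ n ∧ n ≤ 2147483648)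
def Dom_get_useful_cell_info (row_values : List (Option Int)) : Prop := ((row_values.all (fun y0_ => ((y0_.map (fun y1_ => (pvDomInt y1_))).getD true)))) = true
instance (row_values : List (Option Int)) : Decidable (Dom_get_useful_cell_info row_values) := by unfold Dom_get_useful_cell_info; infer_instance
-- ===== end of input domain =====

-- B replaces A's fused accumulator loop by two independent passes (count, first index); objective: idiomatic.

-- ===== PORT A =====
-- one loop over enumerate(row_values) maintaining (count, first_index)
def get_useful_cell_info (row_values : List (Option Int)) : List (String × Option Int) :=
  let st := (PySem.List.enumerate row_values).foldl
    (fun (st : Int × Option Int) p =>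
      if p.2.isSome then
        (st.1 + 1, if st.2.isSome then st.2 else some p.1)
      else st)
    (0, none)
  [("count", some st.1), ("first_index", st.2)]

-- ===== PORT B =====
-- count = sum(1 for v in row_values if v is not None)
def pvCountB (row_values : List (Option Int)) : Int :=
  ((row_values.filter Option.isSome).length : Int)
-- first_index = next((i for i, v in enumerate(row_values) if v is not None), None)
def pvFirstB (row_values : List (Option Int)) : Option Int :=
  (row_values.findIdx? Option.isSome).map Int.ofNat

def get_useful_cell_info_alt (row_values : List (Option Int)) : List (String × Option Int) :=
  [("count", some (pvCountB row_values)), ("first_index", pvFirstB row_values)]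

-- ===== PRECONDITION & SPEC =====
def Spec_get_useful_cell_info (row_values : List (Option Int)) (out : List (String × Option Int)) : Prop := out = get_useful_cell_info_alt row_values
instance (row_values : List (Option Int)) (out : List (String × Option Int)) : Decidable (Spec_get_useful_cell_info row_values out) := by unfold Spec_get_useful_cell_info; infer_instance

-- ===== CLAIM (what is proved, stated in full; the proofs are below) =====
def Claim_equal_get_useful_cell_info : Prop := ∀ (row_values : List (Option Int)), Dom_get_useful_cell_info row_values → Spec_get_useful_cell_info row_values (get_useful_cell_info row_values)

-- ===== LEMMAS AND PROOFS =====
theorem pv_fold_char (row_values : List (Option Int)) : ∀ (s c : Int) (fi : Option Int),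
    (PySem.List.enumerate row_values s).foldl
      (fun (st : Int × Option Int) p =>
        if p.2.isSome then (st.1 + 1, if st.2.isSome then st.2 else some p.1) else st)
      (c, fi)
    = (c + ((row_values.filter Option.isSome).length : Int),
       if fi.isSome then fi
       else (row_values.findIdx? Option.isSome).map (fun k => s + (k : Int))) := by
  induction row_values with
  | nil => intro s c fi; cases fi <;> simp [PySem.List.enumerate_nil]
  | cons x xs ih =>
    intro s c fi
    rw [PySem.List.enumerate_cons, List.foldl_cons]
    cases x with
    | none =>
      simp only [Option.isSome_none, Bool.false_eq_true, if_false]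
      rw [ih]
      simp [List.findIdx?_cons]
      cases fi with
      | none =>
        simp
        cases List.findIdx? Option.isSome xs <;> simp <;> ring_nf
      | some i => simp
    | some v =>
      simp only [Option.isSome_some, if_true]
      rw [ih]
      cases fi with
      | none => simp [List.findIdx?_cons]; ring_nf
      | some i => simp; ring

-- ===== VERDICT (by name: the statement is the Claim_ definition above) =====
theorem get_useful_cell_info_spec : Claim_equal_get_useful_cell_info := by
  intro rv _
  show get_useful_cell_info rv = get_useful_cell_info_alt rv
  unfold get_useful_cell_info get_useful_cell_info_alt pvCountB pvFirstB
  rw [pv_fold_char rv 0 0 none]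
  simp
  cases List.findIdx? Option.isSome rv <;> simp
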